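-- pv_equiv track=rewrite | github.com/dhdepddl/django2 | recommend/pickme/classes/Post.py | rating_doc
-- ===== SOURCE A (Python) =====
-- def count_word_in_topic(doc, words):
--     cnt = 0
--     for noun in doc:
--         for word in words:
--             if noun == word:
--                 cnt += 1
--     return cnt
--
-- def rating_doc(doc, topic_set):
--     rst_topics = []
--     tp_len = len(topic_set)
--     for i in range(tp_len):
--         rst_topics.append(0)
--
--     sum = 0
--     for i in range(tp_len):
--         word_cnt = count_word_in_topic(doc, topic_set[i])
--         rst_topics[i] += word_cnt
--         sum += word_cnt
--
--     return rst_topics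
-- ===== SOURCE B (Python) =====
-- def rating_doc(doc, topic_set):
--     # inverted index: word -> list of topic indices, one entry per occurrence
--     index = {}
--     for i, topic in enumerate(topic_set):
--         for w in topic:
--             index.setdefault(w, []).append(i)
--     rst = [0] * len(topic_set)
--     for noun in doc:
--         for i in index.get(noun, []):
--             rst[i] += 1
--     return rst
-- ===== Notes on version B (the rewrite author's own statement) =====
-- stated objective: alternative
-- what changed: B builds an inverted index from the topics (word -> occurrence list of topic indices) and then makes a single pass over doc, incrementing the result slot once per indexed occurrence, instead of A's per-topic rescans of doc; no per-topic summation remains.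
import Mathlib
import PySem

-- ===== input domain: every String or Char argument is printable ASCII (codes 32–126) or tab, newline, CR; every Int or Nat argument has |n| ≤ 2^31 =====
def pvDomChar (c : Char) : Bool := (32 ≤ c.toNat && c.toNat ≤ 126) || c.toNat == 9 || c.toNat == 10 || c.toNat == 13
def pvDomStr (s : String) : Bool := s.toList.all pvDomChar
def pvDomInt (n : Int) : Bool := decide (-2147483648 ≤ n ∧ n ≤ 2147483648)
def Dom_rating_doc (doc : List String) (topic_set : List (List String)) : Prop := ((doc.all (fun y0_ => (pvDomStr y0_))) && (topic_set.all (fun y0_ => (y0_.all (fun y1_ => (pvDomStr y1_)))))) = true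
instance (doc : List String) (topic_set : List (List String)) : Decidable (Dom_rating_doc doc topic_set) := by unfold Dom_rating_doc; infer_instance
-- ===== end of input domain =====

-- B inverts the data: an index from topic words to topic-index occurrences is built
-- once, then one pass over doc increments the matching slots (objective: alternative).

-- ===== PORT A =====
def count_word_in_topic (doc : List String) (words : List String) : Int :=
  doc.foldl (fun cnt noun =>
    words.foldl (fun c word => if noun == word then c + 1 else c) cnt) 0

def rating_doc (doc : List String) (topic_set : List (List String)) : List Int :=
  let tp_len : Int := topic_set.length
  let rst_topics : List Int :=
    (PySem.List.pyRange 0 tp_len 1).foldl (fun l _ => l ++ [(0 : Int)]) []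
  -- second loop, state (rst_topics, sum); topic_set[i] and rst_topics[i] ported with
  -- pyGetD/pySetD, exact here since every i from range(tp_len) is in range
  ((PySem.List.pyRange 0 tp_len 1).foldl
      (fun (p : List Int × Int) i =>
        let word_cnt := count_word_in_topic doc (PySem.List.pyGetD topic_set i [])
        (PySem.List.pySetD p.1 i (PySem.List.pyGetD p.1 i 0 + word_cnt), p.2 + word_cnt))
      (rst_topics, 0)).1

-- ===== PORT B =====
def rating_doc_alt (doc : List String) (topic_set : List (List String)) : List Int :=
  -- inverted index: word -> list of topic indices, one entry per occurrence
  let index : PySem.Dict String (List Int) :=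
    (PySem.List.enumerate topic_set 0).foldl
      (fun ix p => p.2.foldl (fun ix w => ix.insert w (ix.getD w [] ++ [p.1])) ix)
      PySem.Dict.empty
  let rst : List Int := List.replicate topic_set.length 0
  doc.foldl (fun r noun =>
    (index.getD noun []).foldl
      (fun r i => PySem.List.pySetD r i (PySem.List.pyGetD r i 0 + 1)) r) rst

-- ===== PRECONDITION & SPEC =====
def Spec_rating_doc (doc : List String) (topic_set : List (List String)) (out : List Int) : Prop := out = rating_doc_alt doc topic_set
instance (doc : List String) (topic_set : List (List String)) (out : List Int) : Decidable (Spec_rating_doc doc topic_set out) := by unfold Spec_rating_doc; infer_instance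

-- ===== CLAIM =====
def Claim_equal_rating_doc : Prop := ∀ (doc : List String) (topic_set : List (List String)), Dom_rating_doc doc topic_set → Spec_rating_doc doc topic_set (rating_doc doc topic_set)

-- ===== LEMMAS AND PROOFS =====

-- ---------- A side ----------

-- inner loop of A: counting occurrences of `noun` in `words`
theorem inner_count (words : List String) (noun : String) (c : Int) :
    words.foldl (fun c word => if noun == word then c + 1 else c) c
      = c + (words.count noun : Int) := by
  induction words generalizing c with
  | nil => simp
  | cons w ws ih =>
      simp only [List.foldl_cons, List.count_cons, ih]
      by_cases h : noun = w
      · simp [h]; ring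
      · have h' : ¬ (w == noun) := by simpa [beq_iff_eq] using fun e => h e.symm
        simp [h, h', beq_iff_eq]

theorem count_eq_foldl (doc words : List String) :
    count_word_in_topic doc words
      = doc.foldl (fun c noun => c + (words.count noun : Int)) 0 := by
  unfold count_word_in_topic
  simp only [inner_count]

-- A's zero-initialisation loop builds replicate
theorem zeros_eq (n : ℕ) :
    (PySem.List.pyRange 0 (n : Int) 1).foldl (fun l _ => l ++ [(0 : Int)]) []
      = List.replicate n 0 := by
  have := PySem.List.foldl_append_singleton_eq_map (l := PySem.List.pyRange 0 (n : Int) 1)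
    (f := fun _ => (0 : Int)) (acc := [])
  rw [this]
  simp only [List.nil_append, List.map_const']
  rw [PySem.List.length_pyRange_one]
  simp

-- invariant of A's main loop
theorem loop_inv (doc : List String) (ts : List (List String)) (k : ℕ) (hk : k ≤ ts.length) :
    ((PySem.List.pyRange 0 (k : Int) 1).foldl
      (fun (p : List Int × Int) i =>
        let word_cnt := count_word_in_topic doc (PySem.List.pyGetD ts i [])
        (PySem.List.pySetD p.1 i (PySem.List.pyGetD p.1 i 0 + word_cnt), p.2 + word_cnt))
      (List.replicate ts.length 0, 0)).1
    = (ts.take k).map (fun t => count_word_in_topic doc t)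
        ++ List.replicate (ts.length - k) 0 := by
  induction k with
  | zero => simp [PySem.List.pyRange_one_eq_nil]
  | succ k ih =>
      have hk' : k ≤ ts.length := Nat.le_of_succ_le hk
      have hklt : k < ts.length := hk
      have hsplit : PySem.List.pyRange 0 ((k + 1 : ℕ) : Int) 1
          = PySem.List.pyRange 0 (k : Int) 1 ++ [(k : Int)] := by
        push_cast
        exact PySem.List.pyRange_one_succ_right (by positivity)
      rw [hsplit, List.foldl_append]
      simp only [List.foldl_cons, List.foldl_nil]
      rw [ih hk']
      have hget_ts : PySem.List.pyGetD ts ((k : ℕ) : Int) [] = ts[k] := by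
        rw [PySem.List.pyGetD_natCast]
        exact List.getD_eq_getElem ts [] hklt
      set L := (ts.take k).map (fun t => count_word_in_topic doc t)
          ++ List.replicate (ts.length - k) 0 with hL
      have hlenmap : ((ts.take k).map (fun t => count_word_in_topic doc t)).length = k := by
        simp [Nat.min_eq_left hk']
      have hget_L : PySem.List.pyGetD L ((k : ℕ) : Int) 0 = 0 := by
        rw [PySem.List.pyGetD_natCast, hL]
        rw [List.getD_eq_getElem?_getD, List.getElem?_append_right (by omega)]
        rw [hlenmap]
        simp [hklt]
      have hset : PySem.List.pySetD L ((k : ℕ) : Int)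
            (0 + count_word_in_topic doc ts[k])
          = (ts.take (k+1)).map (fun t => count_word_in_topic doc t)
              ++ List.replicate (ts.length - (k+1)) 0 := by
        rw [PySem.List.pySetD_natCast, hL]
        have hrep : ts.length - k = (ts.length - (k+1)) + 1 := by omega
        rw [hrep, List.replicate_succ]
        rw [List.set_append_right _ _ (by omega), hlenmap]
        simp only [Nat.sub_self, List.set_cons_zero, List.map_take]
        have htake : (ts.map (fun t => count_word_in_topic doc t)).take (k+1)
            = (ts.map (fun t => count_word_in_topic doc t)).take k
              ++ [count_word_in_topic doc ts[k]] := by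
          rw [List.take_add_one, List.getElem?_eq_getElem (by simpa using hklt)]
          simp
        rw [htake]
        simp
      simp only [hget_ts, hget_L, hset]

theorem rating_doc_eq_map (doc : List String) (ts : List (List String)) :
    rating_doc doc ts = ts.map (fun t => count_word_in_topic doc t) := by
  unfold rating_doc
  simp only []
  rw [zeros_eq ts.length, loop_inv doc ts ts.length le_rfl]
  simp

-- ---------- B side ----------

-- the inner word loop of the index build appends the occurrences of one topic
theorem build_inner (t : List String) (ix : PySem.Dict String (List Int))
    (i : Int) (w : String) :
    ((t.foldl (fun ix w' => ix.insert w' (ix.getD w' [] ++ [i])) ix).getD w [])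
      = ix.getD w [] ++ List.replicate (t.count w) i := by
  induction t generalizing ix with
  | nil => simp
  | cons w0 t' ih =>
      simp only [List.foldl_cons, ih, PySem.Dict.getD_insert, List.count_cons]
      by_cases h : w = w0
      · subst h
        simp [List.replicate_succ, List.append_assoc]
      · have h' : ¬ (w0 == w) := by simpa [beq_iff_eq] using fun e => h e.symm
        simp [h, h']

-- occurrence count of index j in the built index entry of w, over an arbitrary pair list
theorem build_count (ets : List (Int × List String)) (ix : PySem.Dict String (List Int))
    (w : String) (j : Int) :
    ((ets.foldl
        (fun ix p => p.2.foldl (fun ix w' => ix.insert w' (ix.getD w' [] ++ [p.1])) ix)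
        ix).getD w []).count j
      = (ix.getD w []).count j
        + ((ets.map (fun p => if p.1 = j then (p.2.count w : ℕ) else 0)).sum) := by
  induction ets generalizing ix with
  | nil => simp
  | cons p ets' ih =>
      simp only [List.foldl_cons, ih, List.map_cons, List.sum_cons]
      rw [build_inner]
      simp only [List.count_append, List.count_replicate]
      by_cases h : p.1 = j <;> simp [h] <;> omega

-- summing the if over an enumeration picks out topic j
theorem enum_sum (w : String) (ts : List (List String)) (s : Int) (j : ℕ) :
    ((PySem.List.enumerate ts s).map
        (fun p => if p.1 = s + (j : Int) then (p.2.count w : ℕ) else 0)).sum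
      = ((ts.getD j []).count w : ℕ) := by
  induction ts generalizing s j with
  | nil => simp
  | cons t ts' ih =>
      rw [PySem.List.enumerate_cons]
      simp only [List.map_cons, List.sum_cons]
      cases j with
      | zero =>
          simp only [Nat.cast_zero, add_zero]
          have hz : ((PySem.List.enumerate ts' (s+1)).map
              (fun p => if p.1 = s then (p.2.count w : ℕ) else 0)).sum = 0 := by
            apply List.sum_eq_zero
            intro x hx
            simp only [List.mem_map] at hx
            obtain ⟨p, hp, rfl⟩ := hx
            rw [PySem.List.mem_enumerate_iff] at hp
            obtain ⟨k, hk, rfl⟩ := hp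
            have hne : ¬ ((s + 1 + (k : Int)) = s) := by omega
            simp [hne]
          rw [hz]
          simp
      | succ k =>
          have hne : ¬ (s = s + ((k+1 : ℕ) : Int)) := by push_cast; omega
          rw [if_neg hne]
          have hcast : ∀ p : Int × List String,
              (if p.1 = s + ((k+1 : ℕ) : Int) then (p.2.count w : ℕ) else 0)
                = (if p.1 = (s+1) + (k : Int) then (p.2.count w : ℕ) else 0) := by
            intro p
            have : (s + ((k+1 : ℕ) : Int)) = (s+1) + (k : Int) := by push_cast; ring
            rw [this]
          simp only [hcast]
          rw [ih (s+1) k]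
          simp

-- every index stored in the built index comes from the pair list
theorem build_mem (ets : List (Int × List String)) (ix : PySem.Dict String (List Int))
    (w : String) (i : Int)
    (h : i ∈ ((ets.foldl
        (fun ix p => p.2.foldl (fun ix w' => ix.insert w' (ix.getD w' [] ++ [p.1])) ix)
        ix).getD w [])) :
    i ∈ ix.getD w [] ∨ ∃ p ∈ ets, i = p.1 := by
  induction ets generalizing ix with
  | nil => exact Or.inl h
  | cons p ets' ih =>
      simp only [List.foldl_cons] at h
      rcases ih _ h with h1 | h2
      · rw [build_inner] at h1
        rcases List.mem_append.mp h1 with h3 | h3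
        · exact Or.inl h3
        · exact Or.inr ⟨p, by simp, (List.eq_of_mem_replicate h3)⟩
      · obtain ⟨q, hq, rfl⟩ := h2
        exact Or.inr ⟨q, by simp [hq], rfl⟩

-- the increment loop: length is preserved
theorem incr_len (is : List Int) (r : List Int) :
    (is.foldl (fun r i => PySem.List.pySetD r i (PySem.List.pyGetD r i 0 + 1)) r).length
      = r.length := by
  induction is generalizing r with
  | nil => rfl
  | cons i is' ih => simp [List.foldl_cons, ih, PySem.List.length_pySetD]

-- the increment loop, pointwise: slot j grows by the number of occurrences of j
theorem incr_getD (is : List Int) (r : List Int) (j : ℕ) (hj : j < r.length)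
    (hb : ∀ i ∈ is, 0 ≤ i ∧ i < (r.length : Int)) :
    (is.foldl (fun r i => PySem.List.pySetD r i (PySem.List.pyGetD r i 0 + 1)) r).getD j 0
      = r.getD j 0 + (is.count ((j : ℕ) : Int) : Int) := by
  induction is generalizing r with
  | nil => simp
  | cons i0 is' ih =>
      obtain ⟨h0, h1⟩ := hb i0 (by simp)
      have hn : i0 = ((i0.toNat : ℕ) : Int) := by omega
      have hnlt : i0.toNat < r.length := by omega
      simp only [List.foldl_cons]
      rw [hn, PySem.List.pySetD_natCast]
      have hlen : (r.set i0.toNat (PySem.List.pyGetD r ((i0.toNat : ℕ) : Int) 0 + 1)).length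
          = r.length := by simp
      rw [ih _ (by omega) (by intro i hi; have := hb i (by simp [hi]); omega)]
      have hget : (r.set i0.toNat (PySem.List.pyGetD r ((i0.toNat : ℕ) : Int) 0 + 1)).getD j 0
          = r.getD j 0 + (if i0.toNat = j then 1 else 0) := by
        rw [List.getD_eq_getElem?_getD, List.getElem?_set]
        by_cases h : i0.toNat = j
        · subst h
          rw [PySem.List.pyGetD_natCast]
          simp [hnlt, List.getD_eq_getElem?_getD]
        · simp [h, List.getD_eq_getElem?_getD]
      rw [hget, List.count_cons]
      have hbeq : (((i0.toNat : ℕ) : Int) == ((j : ℕ) : Int)) = decide (i0.toNat = j) := by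
        by_cases h : i0.toNat = j <;> simp [h] <;> omega
      rw [hbeq]
      by_cases h : i0.toNat = j <;> simp [h] <;> push_cast <;> ring

-- ---------- assembly ----------

theorem alt_eq_map (doc : List String) (ts : List (List String)) :
    rating_doc_alt doc ts = ts.map (fun t => count_word_in_topic doc t) := by
  unfold rating_doc_alt
  simp only []
  set index : PySem.Dict String (List Int) :=
    (PySem.List.enumerate ts 0).foldl
      (fun ix p => p.2.foldl (fun ix w => ix.insert w (ix.getD w [] ++ [p.1])) ix)
      PySem.Dict.empty with hindex
  -- characterisation of the index entries
  have hcount : ∀ (noun : String) (j : ℕ),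
      (index.getD noun []).count ((j : ℕ) : Int) = ((ts.getD j []).count noun : ℕ) := by
    intro noun j
    rw [hindex, build_count]
    have := enum_sum noun ts 0 j
    simp only [zero_add] at this
    simp [this]
  have hmem : ∀ (noun : String) (i : Int), i ∈ index.getD noun [] →
      0 ≤ i ∧ i < (ts.length : Int) := by
    intro noun i hi
    rw [hindex] at hi
    rcases build_mem _ _ _ _ hi with h | ⟨p, hp, rfl⟩
    · simp at h
    · rw [PySem.List.mem_enumerate_iff] at hp
      obtain ⟨k, hk, rfl⟩ := hp
      constructor <;> [positivity; (push_cast; omega)]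
  -- the doc fold, pointwise
  have hlenfold : ∀ (d : List String) (r : List Int),
      (d.foldl (fun r noun =>
        (index.getD noun []).foldl
          (fun r i => PySem.List.pySetD r i (PySem.List.pyGetD r i 0 + 1)) r) r).length
        = r.length := by
    intro d
    induction d with
    | nil => intro r; rfl
    | cons n d' ih => intro r; simp [List.foldl_cons, ih, incr_len]
  have hfold : ∀ (d : List String) (r : List Int) (j : ℕ),
      r.length = ts.length → j < ts.length →
      (d.foldl (fun r noun =>
        (index.getD noun []).foldl
          (fun r i => PySem.List.pySetD r i (PySem.List.pyGetD r i 0 + 1)) r) r).getD j 0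
        = d.foldl (fun c noun => c + (((ts.getD j []).count noun : ℕ) : Int)) (r.getD j 0) := by
    intro d
    induction d with
    | nil => intro r j _ _; simp
    | cons n d' ih =>
        intro r j hr hj
        simp only [List.foldl_cons]
        rw [ih _ j (by rw [incr_len, hr]) hj]
        rw [incr_getD _ _ j (by omega) (by intro i hi; have := hmem n i hi; omega)]
        rw [hcount n j]
  -- conclude elementwise
  apply List.ext_getElem
  · rw [hlenfold]; simp
  · intro j hj1 hj2
    have hjlt : j < ts.length := by simpa using hj2
    rw [← List.getD_eq_getElem _ 0 hj1]
    rw [hfold doc (List.replicate ts.length 0) j (by simp) hjlt]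
    rw [List.getElem_map]
    rw [count_eq_foldl]
    have : ts.getD j [] = ts[j] := List.getD_eq_getElem ts [] hjlt
    rw [this]
    simp

-- ===== VERDICT =====
theorem rating_doc_spec : Claim_equal_rating_doc := by
  intro doc ts _
  unfold Spec_rating_doc
  rw [alt_eq_map, rating_doc_eq_map]
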